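-- pv_equiv track=rewrite | github.com/kapsitis/rbs-datastructures | kalvis-LU-DatZ3168/problem-solvers/binary-search-tree.py | search_idx
-- ===== SOURCE A (Python) =====
-- def get_left_idx(nn):
--     result = 2*nn + 1
--     return result
--
-- def get_right_idx(nn):
--     result = 2*nn+2
--     return result
--
-- def search_idx(tt,nn):
--     curr = 0
--     path = list()
--     while curr<len(tt) and tt[curr] > -1:
--         if nn == tt[curr]:
--             return (curr,path)
--         elif nn < tt[curr]:
--             curr = get_left_idx(curr)
--             path.append('L')
--         else:
--             curr = get_right_idx(curr)
--             path.append('R')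
--     return (-1,list())
-- ===== SOURCE B (Python) =====
-- def _bits_path(k):
--     # Path from the root to heap index k-1, read off the binary digits of k:
--     # a left child 2c+1 has k = 2*(c+1) (even), a right child 2c+2 has k = 2*(c+1)+1 (odd).
--     path = []
--     while k > 1:
--         path.append('L' if k % 2 == 0 else 'R')
--         k //= 2
--     path.reverse()
--     return path
--
-- def search_idx(tt, nn):
--     curr = 0
--     while curr < len(tt) and tt[curr] > -1:
--         v = tt[curr]
--         if nn == v:
--             return (curr, _bits_path(curr + 1))
--         curr = 2 * curr + 1 if nn < v else 2 * curr + 2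
--     return (-1, [])
-- ===== Notes on version B (the rewrite author's own statement) =====
-- stated objective: alternative
-- what changed: B does not accumulate the path during the descent at all: it walks with pure index arithmetic and, only on a hit, reconstructs the path from the binary digits of index+1 (even bit = L, odd bit = R).
import Mathlib
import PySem

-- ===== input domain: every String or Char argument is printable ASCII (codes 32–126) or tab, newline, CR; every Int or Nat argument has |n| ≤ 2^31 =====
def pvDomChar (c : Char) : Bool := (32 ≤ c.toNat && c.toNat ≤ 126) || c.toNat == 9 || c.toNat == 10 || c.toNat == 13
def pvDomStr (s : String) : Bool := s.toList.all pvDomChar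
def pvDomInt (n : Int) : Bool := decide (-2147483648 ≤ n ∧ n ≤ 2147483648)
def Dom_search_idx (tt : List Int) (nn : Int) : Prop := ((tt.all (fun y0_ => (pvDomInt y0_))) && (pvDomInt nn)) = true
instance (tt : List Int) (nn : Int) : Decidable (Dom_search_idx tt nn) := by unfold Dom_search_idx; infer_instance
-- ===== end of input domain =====

-- B drops A's path accumulator entirely: it walks by index arithmetic and, on a hit, reconstructs the path from the binary digits of index+1 (alternative decomposition, same cost).


-- ===== PORT A =====
-- In Python curr is an int, but it starts at 0 and only moves to 2*c+1 / 2*c+2, so it is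
-- always ≥ 0 and we carry it as Nat; the guard curr < tt.length makes tt.getD curr 0 exact
-- for Python's tt[curr]. The loop is made total with a fuel argument: the index strictly
-- increases, so fuel = tt.length + 1 never runs out (fuel 0 gives the loop-exit value).
def get_left_idx (nn : Nat) : Nat := 2 * nn + 1

def get_right_idx (nn : Nat) : Nat := 2 * nn + 2

def searchLoopA (tt : List Int) (nn : Int) : Nat → Nat → List String → Int × List String
  | 0, _, _ => (-1, [])
  | fuel + 1, curr, path =>
    if curr < tt.length ∧ tt.getD curr 0 > -1 then
      if nn = tt.getD curr 0 then ((curr : Int), path)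
      else if nn < tt.getD curr 0 then searchLoopA tt nn fuel (get_left_idx curr) (path ++ ["L"])
      else searchLoopA tt nn fuel (get_right_idx curr) (path ++ ["R"])
    else (-1, [])

def search_idx (tt : List Int) (nn : Int) : Int × List String :=
  searchLoopA tt nn (tt.length + 1) 0 []

-- ===== PORT B =====
-- _bits_path's while-loop: append the move for the low bit, halve, finally reverse.
def bitsLoop : Nat → List String → List String
  | k, path =>
    if _h : 1 < k then
      bitsLoop (k / 2) (path ++ [if k % 2 == 0 then "L" else "R"])
    else path
  termination_by k _ => k
  decreasing_by exact Nat.div_lt_self (by omega) (by omega)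

def bits_path (k : Nat) : List String := (bitsLoop k []).reverse

-- B's walk keeps no path; on a hit it computes the path from the index's bits.
def searchWalkB (tt : List Int) (nn : Int) : Nat → Nat → Int × List String
  | 0, _ => (-1, [])
  | fuel + 1, curr =>
    if curr < tt.length ∧ tt.getD curr 0 > -1 then
      if nn = tt.getD curr 0 then ((curr : Int), bits_path (curr + 1))
      else searchWalkB tt nn fuel (if nn < tt.getD curr 0 then 2 * curr + 1 else 2 * curr + 2)
    else (-1, [])

def search_idx_alt (tt : List Int) (nn : Int) : Int × List String :=
  searchWalkB tt nn (tt.length + 1) 0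

-- ===== PRECONDITION & SPEC =====
def Spec_search_idx (tt : List Int) (nn : Int) (out : Int × List String) : Prop := out = search_idx_alt tt nn
instance (tt : List Int) (nn : Int) (out : Int × List String) : Decidable (Spec_search_idx tt nn out) := by unfold Spec_search_idx; infer_instance

-- ===== CLAIM (what is proved, stated in full; the proofs are below) =====
def Claim_equal_search_idx : Prop := ∀ (tt : List Int) (nn : Int), Dom_search_idx tt nn → Spec_search_idx tt nn (search_idx tt nn)

-- ===== LEMMAS AND PROOFS =====

-- The top-down path to node k-1: recurse on k/2, then the move for the low bit of k.
def pathOf : Nat → List String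
  | k =>
    if _h : 1 < k then
      pathOf (k / 2) ++ [if k % 2 == 0 then "L" else "R"]
    else []
  termination_by k => k
  decreasing_by exact Nat.div_lt_self (by omega) (by omega)

theorem bitsLoop_eq (k : Nat) : ∀ path, bitsLoop k path = path ++ (pathOf k).reverse := by
  induction k using Nat.strong_induction_on with
  | _ k ih =>
    intro path
    rw [bitsLoop, pathOf]
    split
    · rename_i h
      rw [ih (k / 2) (Nat.div_lt_self (by omega) (by omega))]
      simp
    · simp

theorem bits_path_eq (k : Nat) : bits_path k = pathOf k := by
  simp [bits_path, bitsLoop_eq]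

theorem pathOf_left (c : Nat) : pathOf (2 * c + 1 + 1) = pathOf (c + 1) ++ ["L"] := by
  rw [pathOf]
  have h1 : (2 * c + 1 + 1) / 2 = c + 1 := by omega
  have h2 : (2 * c + 1 + 1) % 2 = 0 := by omega
  simp [h1, h2]

theorem pathOf_right (c : Nat) : pathOf (2 * c + 2 + 1) = pathOf (c + 1) ++ ["R"] := by
  rw [pathOf]
  have h1 : (2 * c + 2 + 1) / 2 = c + 1 := by omega
  have h2 : (2 * c + 2 + 1) % 2 = 1 := by omega
  simp [h1, h2]

-- Loop/walk bridge: A's loop carrying path = pathOf (curr+1) equals B's walk from curr.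
theorem loopA_eq_walkB (tt : List Int) (nn : Int) (fuel curr : Nat) :
    searchLoopA tt nn fuel curr (pathOf (curr + 1)) = searchWalkB tt nn fuel curr := by
  induction fuel generalizing curr with
  | zero => rfl
  | succ fuel ih =>
    rw [searchLoopA, searchWalkB]
    split
    · split
      · rw [bits_path_eq]
      · split
        · rw [← pathOf_left, get_left_idx, ih]
        · rw [← pathOf_right, get_right_idx, ih]
    · rfl

-- ===== VERDICT (by name: the statement is the Claim_ definition above) =====
theorem search_idx_spec : Claim_equal_search_idx := by
  intro tt nn _
  unfold Spec_search_idx search_idx search_idx_alt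
  have h0 : pathOf 1 = [] := by rw [pathOf]; simp
  rw [← loopA_eq_walkB, h0]
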